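-- pv_equiv track=rewrite | github.com/RaviSriTejaKuriseti/COL870 | Project/col870-project.py | complete_sentence
-- ===== SOURCE A (Python) =====
-- def complete_sentence(vec,dic):
--     s=""
--     while True:
--         for e in vec:
--             s1=dic[e]
--             if(s1=="_END"):
--                 return s
--             if(s1=="START_"):
--                 continue
--             s+=s1
--         return s
--     return s
-- ===== SOURCE B (Python) =====
-- def complete_sentence(vec, dic):
--     # Phase 1: locate the first '_END' marker (lookups stop there, like A's early return).
--     cut = len(vec)
--     for i, e in enumerate(vec):
--         if dic[e] == "_END":
--             cut = i
--             break
--     # Phase 2: join everything before the cut, dropping 'START_' markers.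
--     return "".join(dic[e] for e in vec[:cut] if dic[e] != "START_")
-- ===== Notes on version B (the rewrite author's own statement) =====
-- stated objective: idiomatic
-- what changed: Replaces the while/for loop with a string accumulator by a two-phase pipeline: first find the index of the first '_END' marker, then ''.join the non-'START_' lookups of the prefix before it.
import Mathlib
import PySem

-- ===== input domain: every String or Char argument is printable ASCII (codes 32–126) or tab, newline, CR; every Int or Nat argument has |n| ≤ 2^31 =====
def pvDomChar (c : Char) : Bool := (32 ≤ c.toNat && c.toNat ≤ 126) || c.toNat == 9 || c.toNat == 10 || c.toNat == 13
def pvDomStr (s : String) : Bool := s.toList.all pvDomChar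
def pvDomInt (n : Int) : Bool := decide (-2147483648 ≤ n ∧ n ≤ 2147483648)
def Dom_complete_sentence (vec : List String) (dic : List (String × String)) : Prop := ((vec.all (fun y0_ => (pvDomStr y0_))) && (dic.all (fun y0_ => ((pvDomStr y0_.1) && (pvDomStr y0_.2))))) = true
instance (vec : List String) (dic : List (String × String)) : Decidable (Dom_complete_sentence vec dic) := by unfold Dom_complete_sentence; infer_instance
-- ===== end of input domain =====

-- B replaces A's accumulating while/for loop by a two-phase pipeline (find the '_END' cut, then join the kept pieces); objective: idiomatic.


-- shared primitive: Python dict lookup dic[e] (first match; none = KeyError)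
def pvLookup? (dic : List (String × String)) (e : String) : Option String :=
  match dic with
  | [] => none
  | (k, v) :: rest => if k = e then some v else pvLookup? rest e

-- ===== PORT A =====
-- the for-loop of A, with accumulator s; the 'none' (KeyError) case is outside Pre_
def pvGoA (dic : List (String × String)) : List String → String → String
  | [], s => s
  | e :: rest, s =>
    match pvLookup? dic e with
    | none => s  -- Python raises KeyError here (excluded by Pre_)
    | some s1 =>
      if s1 = "_END" then s
      else if s1 = "START_" then pvGoA dic rest s
      else pvGoA dic rest (s ++ s1)

def complete_sentence (vec : List String) (dic : List (String × String)) : String :=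
  pvGoA dic vec ""

-- ===== PORT B =====
def complete_sentence_alt (vec : List String) (dic : List (String × String)) : String :=
  let cut := vec.findIdx (fun e => (pvLookup? dic e).getD "" == "_END")
  PySem.Str.join ""
    (((vec.take cut).filter (fun e => (pvLookup? dic e).getD "" ≠ "START_")).map
      (fun e => (pvLookup? dic e).getD ""))

-- ===== PRECONDITION & SPEC =====
-- Pre_ excludes exactly the inputs where A raises KeyError: some element of vec before
-- the first '_END'-valued element is not a key of dic.
def Pre_complete_sentence (vec : List String) (dic : List (String × String)) : Prop :=
  ∀ e ∈ vec.takeWhile (fun e => (dic.lookup e).getD "" ≠ "_END"),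
    (dic.lookup e).isSome
instance (vec : List String) (dic : List (String × String)) : Decidable (Pre_complete_sentence vec dic) := by unfold Pre_complete_sentence; infer_instance

def pvWitness_complete_sentence : List String × (List (String × String)) :=
  (["a", "b", "c", "d"], [("a", "START_"), ("b", "hi "), ("c", "there"), ("d", "_END")])

def Spec_complete_sentence (vec : List String) (dic : List (String × String)) (out : String) : Prop := out = complete_sentence_alt vec dic
instance (vec : List String) (dic : List (String × String)) (out : String) : Decidable (Spec_complete_sentence vec dic out) := by unfold Spec_complete_sentence; infer_instance

-- ===== CLAIM (what is proved, stated in full; the proofs are below) =====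
def Claim_equal_complete_sentence : Prop := ∀ (vec : List String) (dic : List (String × String)), Dom_complete_sentence vec dic → Pre_complete_sentence vec dic → Spec_complete_sentence vec dic (complete_sentence vec dic)

-- ===== LEMMAS AND PROOFS =====
theorem pvLookup?_eq (dic : List (String × String)) (e : String) :
    pvLookup? dic e = dic.lookup e := by
  induction dic with
  | nil => rfl
  | cons p rest ih =>
    cases p with
    | mk k v =>
      by_cases hk : k = e
      · simp [pvLookup?, List.lookup, hk]
      · show (if k = e then some v else pvLookup? rest e) = List.lookup e ((k, v) :: rest)
        rw [List.lookup, show (e == k) = false from beq_eq_false_iff_ne.mpr (fun h => hk h.symm)]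
        simp [hk, ih]

theorem pv_join_cons (x : String) (xs : List String) :
    PySem.Str.join "" (x :: xs) = x ++ PySem.Str.join "" xs := by
  apply String.toList_injective
  cases xs <;> simp [PySem.Str.join, PySem.Chars.join, List.intercalate]

theorem pvGoA_eq (dic : List (String × String)) (vec : List String) (s : String)
    (h : ∀ e ∈ vec.takeWhile (fun e => (pvLookup? dic e).getD "" ≠ "_END"),
      (pvLookup? dic e).isSome) :
    pvGoA dic vec s = s ++ complete_sentence_alt vec dic := by
  induction vec generalizing s with
  | nil => simp [pvGoA, complete_sentence_alt, PySem.Str.join, PySem.Chars.join, List.intercalate]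
  | cons e rest ih =>
    cases hl : pvLookup? dic e with
    | none =>
      exfalso
      have : e ∈ (e :: rest).takeWhile (fun e => (pvLookup? dic e).getD "" ≠ "_END") := by
        simp [hl]
      have := h e this
      simp [hl] at this
    | some s1 =>
      by_cases hend : s1 = "_END"
      · subst hend
        simp [pvGoA, hl, complete_sentence_alt, List.findIdx_cons,
          PySem.Str.join, PySem.Chars.join, List.intercalate]
      · have hpre : ∀ x ∈ rest.takeWhile (fun e => (pvLookup? dic e).getD "" ≠ "_END"),
            (pvLookup? dic x).isSome := by
          intro x hx
          apply h
          rw [List.takeWhile_cons]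
          simp only [hl, Option.getD_some, ne_eq, hend, not_false_iff, decide_true, if_pos]
          · exact List.mem_cons_of_mem _ hx
        have hcut : (e :: rest).findIdx (fun e => (pvLookup? dic e).getD "" == "_END")
            = rest.findIdx (fun e => (pvLookup? dic e).getD "" == "_END") + 1 := by
          rw [List.findIdx_cons,
            show (((pvLookup? dic e).getD "" == "_END")) = false by
              simp [hl]; exact hend]
          rfl
        by_cases hst : s1 = "START_"
        · subst hst
          rw [show pvGoA dic (e :: rest) s = pvGoA dic rest s by simp [pvGoA, hl]]
          rw [ih s hpre]
          congr 1
          simp only [complete_sentence_alt, hcut, List.take_succ_cons, List.filter_cons, hl]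
          simp
        · rw [show pvGoA dic (e :: rest) s = pvGoA dic rest (s ++ s1) by
            simp [pvGoA, hl, hend, hst]]
          rw [ih (s ++ s1) hpre]
          simp only [complete_sentence_alt, hcut, List.take_succ_cons, List.filter_cons, hl]
          simp only [hl, Option.getD_some, ne_eq, hst, not_false_iff, decide_true, if_pos,
            List.map_cons]
          rw [pv_join_cons]
          simp [String.append_assoc]

-- ===== VERDICT (by name: the statement is the Claim_ definition above) =====
theorem complete_sentence_spec : Claim_equal_complete_sentence := by
  intro vec dic _ hpre
  unfold Spec_complete_sentence complete_sentence
  unfold Pre_complete_sentence at hpre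
  simp only [← pvLookup?_eq] at hpre
  rw [pvGoA_eq dic vec "" hpre]
  apply String.toList_injective
  simp
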